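-- pv_equiv track=rewrite | github.com/xkdciizdkeji/innovus_design_space_exploration | random_constraint_modifier.py | extract_rectangles
-- ===== SOURCE A (Python) =====
-- def extract_rectangles(points):
--     """
--     从多边形点序列中提取出组成阶梯状多边形的矩形
--     假设多边形是由固定高度但不同宽度的矩形堆叠而成
--
--     参数:
--         points (list): 点列表，每个点是 [x, y] 的形式
--
--     返回:
--         list: 矩形列表，每个矩形由 [[左下x, 左下y], [右上x, 右上y]] 表示
--     """
--     # 按y坐标排序点
--     sorted_points = sorted(points, key=lambda p: p[1])
--
--     # 找出所有不同的y坐标（高度级别）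
--     heights = sorted(set(p[1] for p in sorted_points))
--
--     # 对每个高度，找出该高度对应的最左和最右的x坐标
--     rectangles = []
--     for i in range(len(heights) - 1):
--         y_bottom = heights[i]
--         y_top = heights[i+1]
--
--         # 找出在底部和顶部的所有点
--         bottom_points = [p[0] for p in sorted_points if p[1] == y_bottom]
--         top_points = [p[0] for p in sorted_points if p[1] == y_top]
--
--         # Find common points between bottom and top (boundary points)
--         common_points = set(bottom_points) & set(top_points)
--
--         # If there are common points, use them as boundaries
--         # Otherwise fall back to the min/max of bottom points
--         left_x = min(common_points) if common_points else min(bottom_points)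
--         right_x = max(common_points) if common_points else max(bottom_points)
--
--
--
--         # # 找出矩形的左右边界
--         # left_x = max(min(bottom_points), min(top_points))
--         # right_x = min(max(bottom_points), max(top_points))
--
--         # 添加矩形 [左下角, 右上角]
--         rectangles.append([[left_x, y_bottom], [right_x, y_top]])
--
--     return rectangles
-- ===== SOURCE B (Python) =====
-- def extract_rectangles(points):
--     # Group x-coordinates by y in one pass, then walk adjacent height pairs.
--     groups = {}
--     for p in points:
--         groups.setdefault(p[1], []).append(p[0])
--     ys = sorted(groups)
--     out = []
--     for i in range(len(ys) - 1):
--         yb, yt = ys[i], ys[i + 1]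
--         bs = set(groups[yb])
--         common = bs & set(groups[yt])
--         xs = common if common else bs
--         out.append([[min(xs), yb], [max(xs), yt]])
--     return out
-- ===== Notes on version B (the rewrite author's own statement) =====
-- stated objective: faster
-- what changed: B builds a dict mapping each y to its x-coordinates in one pass and then walks adjacent sorted heights with O(1) lookups, instead of A's rescan of the whole point list for every height pair.
import Mathlib
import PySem

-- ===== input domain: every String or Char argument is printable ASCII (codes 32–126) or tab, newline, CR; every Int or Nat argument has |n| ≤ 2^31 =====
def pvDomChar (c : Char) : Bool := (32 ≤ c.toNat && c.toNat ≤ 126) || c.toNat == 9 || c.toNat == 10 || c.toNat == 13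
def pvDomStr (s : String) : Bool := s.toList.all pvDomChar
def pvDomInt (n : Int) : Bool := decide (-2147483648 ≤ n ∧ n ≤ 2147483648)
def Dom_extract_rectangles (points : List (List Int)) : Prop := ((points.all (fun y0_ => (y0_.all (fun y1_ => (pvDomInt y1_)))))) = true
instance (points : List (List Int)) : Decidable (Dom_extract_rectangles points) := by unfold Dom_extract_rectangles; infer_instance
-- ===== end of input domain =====

-- B groups x-coordinates by y with one dict pass instead of rescanning all points for every height pair (objective: faster).

-- ===== PORT A =====
-- p[0]/p[1] are ported as List.getD (exact: Pre_ guarantees every point has length ≥ 2, so the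
-- nonnegative literal index is always in range).  min(...)/max(...) are ported as
-- PySem.List.min?/max? with .getD 0 (exact: bottom_points is nonempty whenever the loop body
-- runs, since y_bottom is a y-value occurring in the points, so Python's min/max never raise).
def extract_rectangles (points : List (List Int)) : List (List (List Int)) :=
  let sorted_points := PySem.List.sorted points (fun p => p.getD 1 0) false
  let heights := PySem.List.sorted (PySem.Set.ofList (sorted_points.map (fun p => p.getD 1 0))) (fun y => y) false
  (PySem.List.pyRange 0 ((heights.length : Int) - 1) 1).foldl (fun rectangles i =>
    let y_bottom := PySem.List.pyGetD heights i 0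
    let y_top := PySem.List.pyGetD heights (i + 1) 0
    let bottom_points := (sorted_points.filter (fun p => p.getD 1 0 == y_bottom)).map (fun p => p.getD 0 0)
    let top_points := (sorted_points.filter (fun p => p.getD 1 0 == y_top)).map (fun p => p.getD 0 0)
    let common_points := PySem.Set.inter (PySem.Set.ofList bottom_points) (PySem.Set.ofList top_points)
    let left_x := if common_points ≠ [] then (PySem.List.min? common_points (fun v => v)).getD 0
                  else (PySem.List.min? bottom_points (fun v => v)).getD 0
    let right_x := if common_points ≠ [] then (PySem.List.max? common_points (fun v => v)).getD 0
                   else (PySem.List.max? bottom_points (fun v => v)).getD 0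
    rectangles ++ [[[left_x, y_bottom], [right_x, y_top]]]) []

-- ===== PORT B =====
-- groups.setdefault(p[1], []).append(p[0]) is Dict.modify with default []; min/max as in port A
-- (exact under Pre_ for the same reasons).
def extract_rectangles_alt (points : List (List Int)) : List (List (List Int)) :=
  let groups := points.foldl (fun d p => PySem.Dict.modify d (p.getD 1 0) [] (fun xs => xs ++ [p.getD 0 0])) PySem.Dict.empty
  let ys := PySem.List.sorted (PySem.Dict.keys groups) (fun y => y) false
  (PySem.List.pyRange 0 ((ys.length : Int) - 1) 1).foldl (fun out i =>
    let yb := PySem.List.pyGetD ys i 0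
    let yt := PySem.List.pyGetD ys (i + 1) 0
    let bs := PySem.Set.ofList (PySem.Dict.getD groups yb [])
    let common := PySem.Set.inter bs (PySem.Set.ofList (PySem.Dict.getD groups yt []))
    let xs := if common = [] then bs else common
    out ++ [[[(PySem.List.min? xs (fun v => v)).getD 0, yb], [(PySem.List.max? xs (fun v => v)).getD 0, yt]]]) []

-- ===== PRECONDITION & SPEC =====
-- Pre_ excludes exactly the inputs on which Python A raises IndexError: a point list shorter
-- than 2 (p[1] fails).  On every other input A returns normally.
def Pre_extract_rectangles (points : List (List Int)) : Prop := ∀ p ∈ points, 2 ≤ p.length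
instance (points : List (List Int)) : Decidable (Pre_extract_rectangles points) := by unfold Pre_extract_rectangles; infer_instance
def pvWitness_extract_rectangles : List (List Int) := [[0, 0], [4, 0], [4, 2], [2, 2], [2, 3], [0, 3]]

def Spec_extract_rectangles (points : List (List Int)) (out : List (List (List Int))) : Prop := out = extract_rectangles_alt points
instance (points : List (List Int)) (out : List (List (List Int))) : Decidable (Spec_extract_rectangles points out) := by unfold Spec_extract_rectangles; infer_instance

-- ===== CLAIM (what is proved, stated in full; the proofs are below) =====
def Claim_equal_extract_rectangles : Prop := ∀ (points : List (List Int)), Dom_extract_rectangles points → Pre_extract_rectangles points → Spec_extract_rectangles points (extract_rectangles points)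

-- ===== LEMMAS AND PROOFS =====

-- min/max over the identity key depend only on membership.
theorem min?_id_congr (xs ys : List Int) (h : ∀ a, a ∈ xs ↔ a ∈ ys) :
    PySem.List.min? xs (fun v => v) = PySem.List.min? ys (fun v => v) := by
  cases hx : PySem.List.min? xs (fun v => v) with
  | none =>
    rw [PySem.List.min?_eq_none_iff] at hx
    subst hx
    rw [eq_comm, PySem.List.min?_eq_none_iff]
    rcases ys with _ | ⟨b, t⟩
    · rfl
    · exact absurd ((h b).mpr (by simp)) (by simp)
  | some m =>
    cases hy : PySem.List.min? ys (fun v => v) with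
    | none =>
      rw [PySem.List.min?_eq_none_iff] at hy
      subst hy
      exact absurd ((h m).mp (PySem.List.min?_mem hx)) (by simp)
    | some m' =>
      have h1 := PySem.List.min?_isMin hx m' ((h m').mpr (PySem.List.min?_mem hy))
      have h2 := PySem.List.min?_isMin hy m ((h m).mp (PySem.List.min?_mem hx))
      exact congrArg some (le_antisymm h1 h2)

theorem max?_id_congr (xs ys : List Int) (h : ∀ a, a ∈ xs ↔ a ∈ ys) :
    PySem.List.max? xs (fun v => v) = PySem.List.max? ys (fun v => v) := by
  cases hx : PySem.List.max? xs (fun v => v) with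
  | none =>
    rw [PySem.List.max?_eq_none_iff] at hx
    subst hx
    rw [eq_comm, PySem.List.max?_eq_none_iff]
    rcases ys with _ | ⟨b, t⟩
    · rfl
    · exact absurd ((h b).mpr (by simp)) (by simp)
  | some m =>
    cases hy : PySem.List.max? ys (fun v => v) with
    | none =>
      rw [PySem.List.max?_eq_none_iff] at hy
      subst hy
      exact absurd ((h m).mp (PySem.List.max?_mem hx)) (by simp)
    | some m' =>
      have h1 := PySem.List.max?_isMax hx m' ((h m').mpr (PySem.List.max?_mem hy))
      have h2 := PySem.List.max?_isMax hy m ((h m).mp (PySem.List.max?_mem hx))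
      exact congrArg some (le_antisymm h2 h1)

theorem eq_nil_iff_of_mem_iff {α : Type} (xs ys : List α) (h : ∀ a, a ∈ xs ↔ a ∈ ys) :
    (xs = []) ↔ (ys = []) := by
  simp only [List.eq_nil_iff_forall_not_mem]
  exact ⟨fun hx a ha => hx a ((h a).mpr ha), fun hy a ha => hy a ((h a).mp ha)⟩

-- The dict built by B holds, for each height y, exactly the x's of the points at height y.
theorem pv_groups_getD (points : List (List Int)) (y : Int) :
    PySem.Dict.getD (points.foldl (fun d p => PySem.Dict.modify d (p.getD 1 0) [] (fun xs => xs ++ [p.getD 0 0])) PySem.Dict.empty) y []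
    = (points.filter (fun p => p.getD 1 0 == y)).map (fun p => p.getD 0 0) := by
  have h1 : points.foldl (fun d p => PySem.Dict.modify d (p.getD 1 0) [] (fun xs => xs ++ [p.getD 0 0])) PySem.Dict.empty
      = (points.map (fun p => (p.getD 1 0, p.getD 0 0))).foldl (fun d q => PySem.Dict.modify d q.1 [] (fun xs => xs ++ [q.2])) PySem.Dict.empty := by
    rw [List.foldl_map]
  rw [h1, PySem.Dict.getD_foldl_modify_append, PySem.Dict.getD_empty]
  simp only [List.filter_map, List.map_map]
  rfl

-- Its keys are the distinct heights of the input.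
theorem pv_groups_keys (points : List (List Int)) :
    (points.foldl (fun d p => PySem.Dict.modify d (p.getD 1 0) [] (fun xs => xs ++ [p.getD 0 0])) PySem.Dict.empty).keys
    = PySem.Set.ofList (points.map (fun p => p.getD 1 0)) := by
  rw [PySem.Dict.keys_foldl_modify_key points (fun p => p.getD 1 0) [] (fun _ p xs => xs ++ [p.getD 0 0]) PySem.Dict.empty,
      PySem.Dict.keys_empty, PySem.Set.update_nil_left]

-- ===== VERDICT (by name: the statement is the Claim_ definition above) =====
theorem extract_rectangles_spec : Claim_equal_extract_rectangles := by
  intro points _hdom _hpre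
  unfold Spec_extract_rectangles extract_rectangles extract_rectangles_alt
  simp only [pv_groups_keys, pv_groups_getD]
  have hperm : (PySem.Set.ofList ((PySem.List.sorted points (fun p => p.getD 1 0) false).map (fun p => p.getD 1 0))).Perm
      (PySem.Set.ofList (points.map (fun p => p.getD 1 0))) := by
    refine (List.perm_ext_iff_of_nodup (PySem.Set.nodup_ofList _) (PySem.Set.nodup_ofList _)).mpr ?_
    intro a
    simp [PySem.Set.mem_ofList, PySem.List.mem_sorted]
  rw [PySem.List.sorted_eq_sorted_of_perm _ _ (fun y => y) (fun a b hab => hab) hperm]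
  apply PySem.List.foldl_congr_mem
  intro acc i _hi
  -- on both sides the bottom/top heights are the same terms; only the x-extraction differs
  have hmem : forall (y a : Int),
      (a ∈ ((PySem.List.sorted points (fun p => p.getD 1 0) false).filter (fun p => p.getD 1 0 == y)).map (fun p => p.getD 0 0)) ↔
      a ∈ (points.filter (fun p => p.getD 1 0 == y)).map (fun p => p.getD 0 0) := by
    intro y a
    simp [List.mem_map, List.mem_filter, PySem.List.mem_sorted]
  have hset : forall (y a : Int),
      (a ∈ PySem.Set.ofList (((PySem.List.sorted points (fun p => p.getD 1 0) false).filter (fun p => p.getD 1 0 == y)).map (fun p => p.getD 0 0))) ↔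
      a ∈ PySem.Set.ofList ((points.filter (fun p => p.getD 1 0 == y)).map (fun p => p.getD 0 0)) := by
    intro y a
    rw [PySem.Set.mem_ofList, PySem.Set.mem_ofList]
    exact hmem y a
  set yb := PySem.List.pyGetD (PySem.List.sorted (PySem.Set.ofList (points.map (fun p => p.getD 1 0))) (fun y => y) false) i 0 with hyb
  set yt := PySem.List.pyGetD (PySem.List.sorted (PySem.Set.ofList (points.map (fun p => p.getD 1 0))) (fun y => y) false) (i + 1) 0 with hyt
  set cA := PySem.Set.inter
      (PySem.Set.ofList (((PySem.List.sorted points (fun p => p.getD 1 0) false).filter (fun p => p.getD 1 0 == yb)).map (fun p => p.getD 0 0)))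
      (PySem.Set.ofList (((PySem.List.sorted points (fun p => p.getD 1 0) false).filter (fun p => p.getD 1 0 == yt)).map (fun p => p.getD 0 0))) with hcA
  set cB := PySem.Set.inter
      (PySem.Set.ofList ((points.filter (fun p => p.getD 1 0 == yb)).map (fun p => p.getD 0 0)))
      (PySem.Set.ofList ((points.filter (fun p => p.getD 1 0 == yt)).map (fun p => p.getD 0 0))) with hcB
  have hcomm : forall a : Int, a ∈ cA ↔ a ∈ cB := by
    intro a
    rw [hcA, hcB, PySem.Set.mem_inter, PySem.Set.mem_inter, hset yb a, hset yt a]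
  by_cases hc : cA = []
  · have hc' : cB = [] := (eq_nil_iff_of_mem_iff _ _ hcomm).mp hc
    rw [if_neg (not_not_intro hc), if_neg (not_not_intro hc), if_pos hc',
        min?_id_congr _ _ (fun a => (hmem yb a).trans (PySem.Set.mem_ofList _ a).symm),
        max?_id_congr _ _ (fun a => (hmem yb a).trans (PySem.Set.mem_ofList _ a).symm)]
  · have hc' : cB ≠ [] := fun h => hc ((eq_nil_iff_of_mem_iff _ _ hcomm).mpr h)
    rw [if_pos hc, if_pos hc, if_neg hc', min?_id_congr cA cB hcomm, max?_id_congr cA cB hcomm]
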